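-- pv_equiv track=rewrite | github.com/S3OPS/BloodCraft | scripts/book_structure_examples.py | get_chapter_range
-- ===== SOURCE A (Python) =====
-- def get_chapter_range(book_data, start_chapter_id, end_chapter_id):
--     """Get all chapters in a range."""
--     chapters = []
--     collecting = False
--
--     for chapter in book_data['chapters']:
--         if chapter['id'] == start_chapter_id:
--             collecting = True
--
--         if collecting:
--             chapters.append(chapter)
--
--         if chapter['id'] == end_chapter_id:
--             break
--
--     return chapters
-- ===== SOURCE B (Python) =====
-- def get_chapter_range(book_data, start_chapter_id, end_chapter_id):
--     """Get all chapters in a range."""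
--     chapters = book_data['chapters']
--     ids = [c['id'] for c in chapters]
--     if start_chapter_id not in ids:
--         return []
--     s = ids.index(start_chapter_id)
--     if end_chapter_id not in ids:
--         return chapters[s:]
--     e = ids.index(end_chapter_id)
--     return chapters[s:e + 1] if s <= e else []
-- ===== Notes on version B (the rewrite author's own statement) =====
-- stated objective: simpler
-- what changed: B replaces A's collecting-flag loop with two boundary-index scans (first index of start id, first index of end id) followed by a single slice, returning [] when the end id precedes the start id.
-- outside the precondition, e.g. on get_chapter_range({'chapters': [{'id': 'a'}, {'x': 'y'}]}, 'a', 'a'): A returns [{'id': 'a'}], B raises KeyError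
import Mathlib
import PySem

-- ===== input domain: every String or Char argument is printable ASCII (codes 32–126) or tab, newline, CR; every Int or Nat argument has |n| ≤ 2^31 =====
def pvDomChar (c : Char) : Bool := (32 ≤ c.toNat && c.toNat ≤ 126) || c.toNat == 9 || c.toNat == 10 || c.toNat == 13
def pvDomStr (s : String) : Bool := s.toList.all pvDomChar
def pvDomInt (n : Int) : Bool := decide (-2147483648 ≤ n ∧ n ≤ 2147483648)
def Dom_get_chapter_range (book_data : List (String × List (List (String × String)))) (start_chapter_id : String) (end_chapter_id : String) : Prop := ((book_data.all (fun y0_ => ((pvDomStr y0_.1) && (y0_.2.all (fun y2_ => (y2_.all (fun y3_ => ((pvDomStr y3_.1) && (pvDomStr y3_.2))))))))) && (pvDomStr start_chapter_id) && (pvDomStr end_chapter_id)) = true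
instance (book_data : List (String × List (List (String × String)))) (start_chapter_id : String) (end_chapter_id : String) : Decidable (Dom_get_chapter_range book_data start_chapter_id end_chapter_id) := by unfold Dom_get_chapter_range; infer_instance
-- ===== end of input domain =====

-- B locates the start/end boundary indices with two linear scans and slices the chapter
-- list once, instead of A's element-by-element collecting-flag loop (objective: simpler).


-- ===== PORT A =====
-- chapter['id'] (dict lookup = first match); getD "" is only reached outside Pre_
def pvChapId (c : List (String × String)) : String := (List.lookup "id" c).getD ""

-- the for-loop of A: `coll` is the collecting flag, `break` = stop recursing
def pvGoA (start_id end_id : String) : List (List (String × String)) → Bool → List (List (String × String))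
  | [], _ => []
  | c :: rest, coll =>
    let coll' := if pvChapId c = start_id then true else coll
    let here := if coll' then [c] else []
    if pvChapId c = end_id then here else here ++ pvGoA start_id end_id rest coll'

def get_chapter_range (book_data : List (String × List (List (String × String)))) (start_chapter_id : String) (end_chapter_id : String) : List (List (String × String)) :=
  pvGoA start_chapter_id end_chapter_id ((List.lookup "chapters" book_data).getD []) false

-- ===== PORT B =====
def get_chapter_range_alt (book_data : List (String × List (List (String × String)))) (start_chapter_id : String) (end_chapter_id : String) : List (List (String × String)) :=
  let chapters := (List.lookup "chapters" book_data).getD []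
  let ids := chapters.map pvChapId
  match PySem.List.index? ids start_chapter_id with
  | none => []
  | some s =>
    match PySem.List.index? ids end_chapter_id with
    | none => PySem.List.slice chapters (some (s : Int)) none
    | some e => if s ≤ e then PySem.List.slice chapters (some (s : Int)) (some ((e : Int) + 1)) else []

-- ===== PRECONDITION & SPEC =====
-- Pre_ excludes inputs where Python raises KeyError: book_data without a "chapters" key, or a
-- chapter without an "id" key.  (A only reads ids up to its break, so it can still RETURN when a
-- missing "id" lies after the break; B reads every id and raises there, so those go outside Pre_.)
def Pre_get_chapter_range (book_data : List (String × List (List (String × String)))) (start_chapter_id : String) (end_chapter_id : String) : Prop :=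
  (List.lookup "chapters" book_data).isSome ∧
  ∀ c ∈ (List.lookup "chapters" book_data).getD [], (List.lookup "id" c).isSome
instance (book_data : List (String × List (List (String × String)))) (start_chapter_id : String) (end_chapter_id : String) : Decidable (Pre_get_chapter_range book_data start_chapter_id end_chapter_id) := by unfold Pre_get_chapter_range; infer_instance

def pvWitness_get_chapter_range : (List (String × List (List (String × String)))) × String × String :=
  ([("chapters", [[("id", "a")], [("id", "b")], [("id", "c")]])], "a", "b")

def Spec_get_chapter_range (book_data : List (String × List (List (String × String)))) (start_chapter_id : String) (end_chapter_id : String) (out : List (List (String × String))) : Prop := out = get_chapter_range_alt book_data start_chapter_id end_chapter_id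
instance (book_data : List (String × List (List (String × String)))) (start_chapter_id : String) (end_chapter_id : String) (out : List (List (String × String))) : Decidable (Spec_get_chapter_range book_data start_chapter_id end_chapter_id out) := by unfold Spec_get_chapter_range; infer_instance

-- ===== CLAIM (what is proved, stated in full; the proofs are below) =====
def Claim_equal_get_chapter_range : Prop := ∀ (book_data : List (String × List (List (String × String)))) (start_chapter_id : String) (end_chapter_id : String), Dom_get_chapter_range book_data start_chapter_id end_chapter_id → Pre_get_chapter_range book_data start_chapter_id end_chapter_id → Spec_get_chapter_range book_data start_chapter_id end_chapter_id (get_chapter_range book_data start_chapter_id end_chapter_id)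



-- ===== LEMMAS AND PROOFS =====

-- once collecting, A takes everything up to (and including) the first end-id match
lemma pvGoA_true (s e : String) (chs : List (List (String × String))) :
    pvGoA s e chs true =
      match PySem.List.index? (chs.map pvChapId) e with
      | none => chs
      | some ei => chs.take (ei + 1) := by
  induction chs with
  | nil => simp [pvGoA]
  | cons c rest ih =>
    rw [List.map_cons]
    simp only [pvGoA, ite_self]
    by_cases he : pvChapId c = e
    · rw [he, PySem.List.index?_cons_self, if_pos rfl]
      simp
    · rw [PySem.List.index?_cons_of_ne _ he, if_neg he, ih]
      cases PySem.List.index? (List.map pvChapId rest) e <;> simp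

-- A's scan from the not-yet-collecting state equals B's boundary-index computation
lemma pvGoA_false (s e : String) (chs : List (List (String × String))) :
    pvGoA s e chs false =
      match PySem.List.index? (chs.map pvChapId) s with
      | none => []
      | some si =>
        match PySem.List.index? (chs.map pvChapId) e with
        | none => chs.drop si
        | some ei => if si ≤ ei then (chs.drop si).take (ei + 1 - si) else [] := by
  induction chs with
  | nil => simp [pvGoA]
  | cons c rest ih =>
    rw [List.map_cons]
    simp only [pvGoA]
    by_cases hs : pvChapId c = s
    · rw [hs, PySem.List.index?_cons_self, if_pos rfl]
      by_cases he : pvChapId c = e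
      · rw [hs] at he
        rw [show e = s from he.symm, PySem.List.index?_cons_self, if_pos rfl]
        simp
      · rw [hs] at he
        rw [PySem.List.index?_cons_of_ne _ he, if_neg (hs ▸ he), pvGoA_true]
        cases PySem.List.index? (List.map pvChapId rest) e <;> simp
    · rw [if_neg hs, PySem.List.index?_cons_of_ne _ hs]
      by_cases he : pvChapId c = e
      · rw [he, PySem.List.index?_cons_self, if_pos rfl]
        cases PySem.List.index? (List.map pvChapId rest) s <;> simp
      · rw [PySem.List.index?_cons_of_ne _ he, if_neg he, ih]
        simp only [Bool.false_eq_true, ite_false, List.nil_append]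
        cases PySem.List.index? (List.map pvChapId rest) s with
        | none => simp
        | some si =>
          cases PySem.List.index? (List.map pvChapId rest) e with
          | none => simp
          | some ei => simp

-- ===== VERDICT (by name: the statement is the Claim_ definition above) =====
theorem get_chapter_range_spec : Claim_equal_get_chapter_range := by
  intro bd s e _ _
  unfold Spec_get_chapter_range get_chapter_range
  simp only [get_chapter_range_alt]
  rw [pvGoA_false]
  cases PySem.List.index? (((List.lookup "chapters" bd).getD []).map pvChapId) s with
  | none => rfl
  | some si =>
    cases PySem.List.index? (((List.lookup "chapters" bd).getD []).map pvChapId) e with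
    | none => simp [PySem.List.slice_from_natCast]
    | some ei =>
      dsimp only
      rw [show ((ei : Int) + 1) = ((ei + 1 : Nat) : Int) by push_cast; ring]
      simp only [PySem.List.slice_natCast]
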